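-- pv_equiv track=rewrite | github.com/ChiyunNoh/CodeForder | CodingTest/프로그래머스 모음사전 노치윤.py | solution
-- ===== SOURCE A (Python) =====
-- dic={'A':1,'E':2,'I':3,'O':4,'U':5}
--
-- def iter(num,cnt):
--     if num==10000:
--         return cnt
--     temp=num
--     for i in range(5):
--         if i==4:
--             return cnt+(temp-1)*781
--         if (temp%10!=0) & (temp%10!=1):
--             temp=temp-1
--             for j in range(i):
--                 temp=temp*10
--                 temp=temp+5
--             break
--         elif temp%10==1 :
--             temp=temp-1
--             for j in range(i):
--                 temp=temp*10
--             break
--         else: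
--             temp=temp//10
--     return iter(temp,cnt+1)
--
-- def solution(word):
--     answer = 0
--     num=0
--     for i in word:
--         num=num*10
--         num=num+dic[i]
--     num=num*(10**(5-len(word)))
--     answer=iter(num,1)
--     return answer
-- ===== SOURCE B (Python) =====
-- dic={'A':1,'E':2,'I':3,'O':4,'U':5}
--
-- def solution(word):
--     multiples = [781, 156, 31, 6, 1]
--     answer = 0
--     for i, c in enumerate(word):
--         answer += multiples[i] * (dic[c] - 1) + 1
--     return answer
-- ===== Notes on version B (the rewrite author's own statement) =====
-- stated objective: simpler
-- what changed: Replaces A's recursive count-down through the whole dictionary (decrementing a 5-digit encoding until it reaches 10000) with a single pass over the word accumulating the closed-form rank multiples[i]*(dic[c]-1)+1 per letter.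
-- intended difference: On the empty word A returns -780, an artefact of iter counting down from the encoding 0; B returns 0, the natural rank-sum of no letters. — e.g. on solution(""): A returns -780, B returns 0
import Mathlib
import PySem

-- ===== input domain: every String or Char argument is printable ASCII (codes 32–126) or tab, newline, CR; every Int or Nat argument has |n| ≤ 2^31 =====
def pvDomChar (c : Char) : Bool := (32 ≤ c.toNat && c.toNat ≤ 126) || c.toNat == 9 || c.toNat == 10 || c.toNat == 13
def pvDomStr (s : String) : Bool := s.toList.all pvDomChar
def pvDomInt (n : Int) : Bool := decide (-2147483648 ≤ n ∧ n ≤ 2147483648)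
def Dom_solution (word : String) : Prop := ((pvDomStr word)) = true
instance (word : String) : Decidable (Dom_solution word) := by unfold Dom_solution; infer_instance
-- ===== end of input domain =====

set_option maxRecDepth 16000
set_option maxHeartbeats 2000000

-- B replaces A's recursive dictionary count-down with the closed-form per-letter rank sum;
-- equivalence is claimed on vowel-only words of length ≤ 5 (Python A raises on any other word),
-- and on the empty word A's -780 is an artefact, B returns 0 (stated as D_ below).

-- ===== PORT A =====
-- dic={'A':1,'E':2,'I':3,'O':4,'U':5}
def dicA : PySem.Dict Char Int :=
  (((((PySem.Dict.empty.insert 'A' 1).insert 'E' 2).insert 'I' 3).insert 'O' 4).insert 'U' 5)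

-- the body of iter's `for i in range(5)` loop: .inl = a `return` out of iter, .inr = the broken-out temp
def iterLoopA (cnt : Int) : List Nat → Int → Int ⊕ Int
  | [], temp => .inr temp        -- loop falls through (unreachable in fact: i==4 always returns)
  | i :: rest, temp =>
    if i == 4 then .inl (cnt + (temp - 1) * 781)
    else if PySem.Int.mod temp 10 ≠ 0 ∧ PySem.Int.mod temp 10 ≠ 1 then
      -- temp-=1; for j in range(i): temp=temp*10; temp=temp+5; break
      .inr (List.foldl (fun t _ => t * 10 + 5) (temp - 1) (List.range i))
    else if PySem.Int.mod temp 10 == 1 then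
      -- temp-=1; for j in range(i): temp=temp*10; break
      .inr (List.foldl (fun t _ => t * 10) (temp - 1) (List.range i))
    else
      iterLoopA cnt rest (PySem.Int.floordiv temp 10)

-- iter(num,cnt); the fuel only makes the Python recursion structural (10000 is ample: the
-- recursion depth on any admitted input stays below 800, and outside Pre_ nothing is claimed)
def iterA : Nat → Int → Int → Int
  | 0, _, _ => 0
  | fuel + 1, num, cnt =>
    if num == 10000 then cnt
    else
      match iterLoopA cnt (List.range 5) num with
      | .inl r => r
      | .inr temp => iterA fuel temp (cnt + 1)

-- solution's body on the word's character list (String.toList is the `for i in word` view)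
def solutionList (l : List Char) : Int :=
  -- num = 0; for i in word: num = num*10 + dic[i]   (dic[i] raises KeyError outside Pre_; getD stand-in)
  let num : Int := l.foldl (fun n c => n * 10 + dicA.getD c 0) 0
  -- num = num * 10**(5-len(word))   (len > 5 leaves the Int type in Python; outside Pre_)
  let num := num * (10 : Int) ^ (5 - l.length)
  iterA 10000 num 1

def solution (word : String) : Int := solutionList word.toList

-- ===== PORT B =====
def multiplesB : List Int := [781, 156, 31, 6, 1]

def solutionAltList (l : List Char) : Int :=
  (l.zipIdx).foldl
    (fun answer ci => answer + (multiplesB.getD ci.2 0) * (dicA.getD ci.1 0 - 1) + 1) 0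

def solution_alt (word : String) : Int := solutionAltList word.toList

-- ===== PRECONDITION & SPEC =====
-- Pre_ admits exactly the vowel-only words of length ≤ 5: on any other word Python A raises
-- (KeyError on a non-vowel letter; float exponent / RecursionError for length > 5).
def Pre_solution (word : String) : Prop :=
  word.toList.length ≤ 5 ∧
    (word.toList.all (fun c => c ∈ (['A', 'E', 'I', 'O', 'U'] : List Char))) = true
instance (word : String) : Decidable (Pre_solution word) := by unfold Pre_solution; infer_instance

def pvWitness_solution : String := "EIO"

-- On the empty word A returns -780 (an artefact of iter counting down from the encoding 0
-- past rank 1); B returns 0, the natural value of the empty rank sum.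
def D_solution (word : String) : Prop := word = ""
instance (word : String) : Decidable (D_solution word) := by unfold D_solution; infer_instance

def Spec_solution (word : String) (out : Int) : Prop := ¬ D_solution word → out = solution_alt word
instance (word : String) (out : Int) : Decidable (Spec_solution word out) := by unfold Spec_solution; infer_instance

def pvDiffWitness_solution : String := ""
def pvDiffWitnessOut_solution : Int × Int := (-780, 0)

-- ===== CLAIM (what is proved, stated in full; the proofs are below) =====
def Claim_unchanged_solution : Prop := ∀ (word : String), Dom_solution word → Pre_solution word → Spec_solution word (solution word)
def Claim_changed_solution : Prop := Dom_solution (pvDiffWitness_solution) ∧ Pre_solution (pvDiffWitness_solution) ∧ D_solution (pvDiffWitness_solution) ∧ solution (pvDiffWitness_solution) = pvDiffWitnessOut_solution.1 ∧ solution_alt (pvDiffWitness_solution) = pvDiffWitnessOut_solution.2 ∧ pvDiffWitnessOut_solution.1 ≠ pvDiffWitnessOut_solution.2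
def Claim_exact_solution : Prop := ∀ (word : String), Dom_solution word → Pre_solution word → D_solution word → solution word ≠ solution_alt word

-- ===== LEMMAS AND PROOFS =====
-- all nonempty vowel words (as char lists) of length ≤ n
def allW : Nat → List (List Char)
  | 0 => []
  | n + 1 => (['A', 'E', 'I', 'O', 'U'] : List Char).flatMap
      (fun c => [c] :: (allW n).map (c :: ·))

theorem mem_allW : ∀ (n : Nat) (l : List Char), l ≠ [] → l.length ≤ n →
    (∀ c ∈ l, c ∈ (['A', 'E', 'I', 'O', 'U'] : List Char)) → l ∈ allW n := by
  intro n
  induction n with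
  | zero =>
    intro l hne hlen _
    cases l with
    | nil => exact absurd rfl hne
    | cons c t => simp at hlen
  | succ n ih =>
    intro l hne hlen hv
    cases l with
    | nil => exact absurd rfl hne
    | cons c t =>
      have hc : c ∈ (['A', 'E', 'I', 'O', 'U'] : List Char) := hv c (by simp)
      simp only [allW, List.mem_flatMap]
      refine ⟨c, hc, ?_⟩
      cases t with
      | nil => simp
      | cons d u =>
        have ht : (d :: u) ∈ allW n := by
          apply ih
          · simp
          · simpa using Nat.le_of_succ_le_succ hlen
          · intro x hx; exact hv x (List.mem_cons_of_mem _ hx)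
        simp only [List.mem_cons, List.mem_map]
        exact Or.inr ⟨d :: u, ht, rfl⟩

theorem allW_props : ∀ (n : Nat) (l : List Char), l ∈ allW n →
    l ≠ [] ∧ l.length ≤ n ∧ ∀ c ∈ l, c ∈ (['A', 'E', 'I', 'O', 'U'] : List Char) := by
  intro n
  induction n with
  | zero => intro l h; simp [allW] at h
  | succ n ih =>
    intro l h
    simp only [allW, List.mem_flatMap, List.mem_cons, List.mem_map] at h
    obtain ⟨c, hc, h⟩ := h
    rcases h with rfl | ⟨t, ht, rfl⟩
    · refine ⟨by simp, by simp, ?_⟩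
      intro x hx; simp at hx; subst hx; simpa using hc
    · obtain ⟨hne, hlen, hv⟩ := ih t ht
      refine ⟨by simp, by simp; omega, ?_⟩
      intro x hx
      rcases List.mem_cons.mp hx with rfl | hx
      · simpa using hc
      · exact hv x hx

def predC (c : Char) : Char :=
  if c = 'E' then 'A' else if c = 'I' then 'E' else if c = 'O' then 'I'
  else if c = 'U' then 'O' else c

-- the previous word of the generated dictionary (only used/checked on admitted words)
def prevW (w : List Char) : List Char :=
  match w.getLast? with
  | none => []
  | some c =>
    if c = 'A' then w.dropLast
    else w.dropLast ++ [predC c] ++ List.replicate (5 - w.length) 'U'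

def encodeW (l : List Char) : Int :=
  (l.foldl (fun n c => n * 10 + dicA.getD c 0) 0) * (10 : Int) ^ (5 - l.length)

-- the one-step behaviour of iter on each admitted word, checked by the kernel word by word
def checkW (w : List Char) : Bool :=
  (decide (1 ≤ solutionAltList w) && decide (solutionAltList w ≤ 3905)) &&
  (if encodeW w = 10000 then decide (solutionAltList w = 1)
   else if w.length = 1 then
     decide (iterLoopA 0 (List.range 5) (encodeW w) = Sum.inl (solutionAltList w - 1))
   else
     decide (iterLoopA 0 (List.range 5) (encodeW w) = Sum.inr (encodeW (prevW w))) &&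
     decide (solutionAltList (prevW w) = solutionAltList w - 1))

theorem checkW_all : (allW 5).all checkW = true := by decide

theorem prevW_mem (w : List Char) (hw : w ∈ allW 5) (h2 : 2 ≤ w.length) :
    prevW w ∈ allW 5 := by
  obtain ⟨hne, hlen, hv⟩ := allW_props 5 w hw
  cases hgl : w.getLast? with
  | none => exact absurd (List.getLast?_eq_none_iff.mp hgl) hne
  | some c =>
    have hcv : c ∈ (['A', 'E', 'I', 'O', 'U'] : List Char) :=
      hv c (List.mem_of_getLast? hgl)
    unfold prevW
    rw [hgl]
    dsimp only
    split_ifs with hA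
    · apply mem_allW
      · have hdl : w.dropLast.length = w.length - 1 := List.length_dropLast
        intro h; rw [h] at hdl; simp at hdl; omega
      · have hdl : w.dropLast.length = w.length - 1 := List.length_dropLast
        omega
      · intro x hx; exact hv x (List.dropLast_subset w hx)
    · apply mem_allW
      · simp
      · simp [List.length_dropLast, List.length_replicate]; omega
      · intro x hx
        simp only [List.append_assoc, List.mem_append, List.mem_singleton,
          List.mem_replicate] at hx
        rcases hx with hx | hx | hx
        · exact hv x (List.dropLast_subset w hx)
        · subst hx
          simp only [List.mem_cons, List.not_mem_nil, or_false] at hcv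
          rcases hcv with rfl | rfl | rfl | rfl | rfl <;> simp [predC]
        · rw [hx.2]; simp

theorem iterLoopA_shift (is : List Nat) (cnt t : Int) :
    iterLoopA cnt is t = (iterLoopA 0 is t).map (fun v => cnt + v) id := by
  induction is generalizing t with
  | nil => simp [iterLoopA]
  | cons i rest ih =>
    simp only [iterLoopA]
    split_ifs with h1 h2 h3 <;> simp [ih]

theorem iterA_rank : ∀ (fuel : Nat) (w : List Char), w ∈ allW 5 →
    (solutionAltList w).toNat ≤ fuel →
    ∀ cnt : Int, iterA fuel (encodeW w) cnt = cnt + solutionAltList w - 1 := by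
  intro fuel
  induction fuel with
  | zero =>
    intro w hw hle cnt
    have h := List.all_eq_true.mp checkW_all w hw
    unfold checkW at h
    simp only [Bool.and_eq_true, decide_eq_true_eq] at h
    omega
  | succ fuel ih =>
    intro w hw hle cnt
    have h := List.all_eq_true.mp checkW_all w hw
    unfold checkW at h
    simp only [Bool.and_eq_true, decide_eq_true_eq] at h
    obtain ⟨⟨h1, h2⟩, h3⟩ := h
    by_cases he : encodeW w = 10000
    · rw [if_pos he] at h3
      have hr1 : solutionAltList w = 1 := by simpa using h3
      rw [he, hr1]
      simp [iterA]
    · rw [if_neg he] at h3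
      have hne10 : (encodeW w == 10000) = false := by simp [he]
      by_cases hl : w.length = 1
      · rw [if_pos hl] at h3
        have h4 : iterLoopA 0 (List.range 5) (encodeW w)
            = Sum.inl (solutionAltList w - 1) := by simpa using h3
        have hsh := iterLoopA_shift (List.range 5) cnt (encodeW w)
        rw [h4] at hsh
        simp only [iterA, hne10, Bool.false_eq_true, if_false, hsh, Sum.map_inl]
        omega
      · rw [if_neg hl] at h3
        simp only [Bool.and_eq_true, decide_eq_true_eq] at h3
        obtain ⟨h4, h5⟩ := h3
        have hne : w ≠ [] := (allW_props 5 w hw).1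
        have h2le : 2 ≤ w.length := by
          have : w.length ≠ 0 := by simpa [List.length_eq_zero_iff] using hne
          omega
        have hp := prevW_mem w hw h2le
        have hsh := iterLoopA_shift (List.range 5) cnt (encodeW w)
        rw [h4] at hsh
        have hstep : iterA (fuel + 1) (encodeW w) cnt
            = iterA fuel (encodeW (prevW w)) (cnt + 1) := by
          simp only [iterA, hne10, Bool.false_eq_true, if_false, hsh, Sum.map_inr, id]
        rw [hstep, ih (prevW w) hp (by omega) (cnt + 1), h5]
        omega

-- evaluating iterA on the literal fuel 10000 by `decide` forces the whole brecOn tower,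
-- so the empty-word value is obtained by one equation-lemma step instead
theorem solution_empty : solution "" = -780 := by
  have h0 : ("" : String).toList = [] := by decide
  show solutionList ("" : String).toList = -780
  rw [h0]
  show iterA 10000 ((0 : Int) * 10 ^ 5) 1 = -780
  rw [show (10000 : Nat) = 9999 + 1 from rfl, iterA]
  decide

-- ===== VERDICT (by name: the statement is the Claim_ definition above) =====
theorem solution_spec : Claim_unchanged_solution := by
  intro word _ hpre hnd
  have hne : word.toList ≠ [] := fun h => hnd (String.toList_eq_nil_iff.mp h)
  have hv : ∀ c ∈ word.toList, c ∈ (['A', 'E', 'I', 'O', 'U'] : List Char) :=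
    fun c hc => by simpa using List.all_eq_true.mp hpre.2 c hc
  have hmem : word.toList ∈ allW 5 := mem_allW 5 word.toList hne hpre.1 hv
  have h := List.all_eq_true.mp checkW_all word.toList hmem
  unfold checkW at h
  simp only [Bool.and_eq_true, decide_eq_true_eq] at h
  have : solution word = iterA 10000 (encodeW word.toList) 1 := rfl
  rw [this, iterA_rank 10000 word.toList hmem (by omega) 1]
  have hb : solution_alt word = solutionAltList word.toList := rfl
  rw [hb]
  omega

theorem solution_changed : Claim_changed_solution := by
  unfold Claim_changed_solution
  refine ⟨by decide, by decide, by decide, ?_, by decide, by decide⟩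
  simpa using solution_empty

theorem solution_tight : Claim_exact_solution := by
  intro word _ _ hd
  unfold D_solution at hd
  subst hd
  rw [solution_empty]
  decide
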